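-- pv_equiv track=rewrite | github.com/napari/napari | docs/_scripts/update_event_docs.py | merge_image_and_label_rows
-- ===== SOURCE A (Python) =====
-- from typing import Dict, Iterator, List, Optional, Type
--
-- def merge_image_and_label_rows(rows: List[List[str]]):
--     """Merge events common to _ImageBase or IntensityVisualizationMixin."""
--     # find events that are common across both Image, Labels and Surface layers.
--     image_events = {r[1] for r in rows if r[0] == '`Image`'}
--     labels_events = {r[1] for r in rows if r[0] == '`Labels`'}
--     surface_events = {r[1] for r in rows if r[0] == '`Surface`'}
--     common_events = image_events & labels_events & surface_events
--     # common only to Image and Labels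
--     imagebase_events = (image_events & labels_events) - common_events
--
--     # drop duplicate Labels and/or Surface entries
--     rows = [
--         r
--         for r in rows
--         if not (r[0] in ['`Labels`', '`Surface`'] and r[1] in common_events)
--     ]
--     rows = [
--         r
--         for r in rows
--         if not (r[0] in ['`Labels`', '`Surface`'] and r[1] in imagebase_events)
--     ]
--
--     # modify the class name of the Image entries to mention Labels, Surface
--     rows = [
--         ['`Image`, `Labels`'] + r[1:]
--         if r[0] == '`Image`' and r[1] in imagebase_events
--         else r
--         for r in rows
--     ]
--     rows = [
--         ['`Image`, `Labels`, `Surface`'] + r[1:]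
--         if r[0] == '`Image`' and r[1] in common_events
--         else r
--         for r in rows
--     ]
--     return rows
-- ===== SOURCE B (Python) =====
-- def merge_image_and_label_rows(rows):
--     """Merge events common to _ImageBase or IntensityVisualizationMixin."""
--     # One dict: event name -> bitmask of which of the three layer kinds list it.
--     BIT = {'`Image`': 1, '`Labels`': 2, '`Surface`': 4}
--     seen = {}
--     for r in rows:
--         if r[0] in BIT:
--             seen[r[1]] = seen.get(r[1], 0) | BIT[r[0]]
--     out = []
--     for r in rows:
--         if r[0] not in BIT:
--             out.append(r)
--             continue
--         m = seen.get(r[1], 0)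
--         if r[0] == '`Image`':
--             if m == 7:
--                 out.append(['`Image`, `Labels`, `Surface`'] + r[1:])
--             elif m & 3 == 3:
--                 out.append(['`Image`, `Labels`'] + r[1:])
--             else:
--                 out.append(r)
--         elif m & 3 == 3:
--             # event shared by Image and Labels: duplicate Labels/Surface row
--             continue
--         else:
--             out.append(r)
--     return out
-- ===== Notes on version B (the rewrite author's own statement) =====
-- stated objective: alternative
-- what changed: Replaces A's set algebra (three per-layer event sets, two intersections and a difference, then four filter/map passes) by one dict mapping each event name to a bitmask of the layer kinds that list it, and one output pass that drops or relabels each row directly from bitmask tests (m == 7 for all three layers, m & 3 == 3 for Image-and-Labels).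
import Mathlib
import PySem

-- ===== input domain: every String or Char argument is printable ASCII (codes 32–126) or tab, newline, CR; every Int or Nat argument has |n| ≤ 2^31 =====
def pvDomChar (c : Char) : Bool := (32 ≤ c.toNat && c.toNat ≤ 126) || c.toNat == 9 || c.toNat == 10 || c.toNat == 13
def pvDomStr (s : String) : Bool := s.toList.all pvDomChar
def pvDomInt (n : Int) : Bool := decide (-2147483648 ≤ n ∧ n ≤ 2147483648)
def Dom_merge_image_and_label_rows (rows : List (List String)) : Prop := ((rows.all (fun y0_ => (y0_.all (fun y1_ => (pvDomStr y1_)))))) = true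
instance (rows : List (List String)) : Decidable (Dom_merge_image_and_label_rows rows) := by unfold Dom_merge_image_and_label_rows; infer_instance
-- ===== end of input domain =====

-- B replaces A's set algebra (three per-layer event sets, two intersections/difference and four
-- filter/map passes) by a single dict mapping each event name to a bitmask of the layer kinds that
-- list it, classifying every row directly from that bitmask (objective: alternative).

-- ===== PORT A =====
-- r[0] / r[1] are ported as pyGetD with an unreachable default: Pre_ restricts to inputs
-- where every index access A performs is in range (elsewhere A raises IndexError).
def merge_image_and_label_rows (rows : List (List String)) : List (List String) :=
  let image_events := PySem.Set.ofList ((rows.filter (fun r => PySem.List.pyGetD r 0 "" == "`Image`")).map (fun r => PySem.List.pyGetD r 1 ""))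
  let labels_events := PySem.Set.ofList ((rows.filter (fun r => PySem.List.pyGetD r 0 "" == "`Labels`")).map (fun r => PySem.List.pyGetD r 1 ""))
  let surface_events := PySem.Set.ofList ((rows.filter (fun r => PySem.List.pyGetD r 0 "" == "`Surface`")).map (fun r => PySem.List.pyGetD r 1 ""))
  let common_events := PySem.Set.inter (PySem.Set.inter image_events labels_events) surface_events
  let imagebase_events := PySem.Set.diff (PySem.Set.inter image_events labels_events) common_events
  let rows1 := rows.filter (fun r =>
    !((PySem.List.pyGetD r 0 "" == "`Labels`" || PySem.List.pyGetD r 0 "" == "`Surface`") &&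
      PySem.Set.contains common_events (PySem.List.pyGetD r 1 "")))
  let rows2 := rows1.filter (fun r =>
    !((PySem.List.pyGetD r 0 "" == "`Labels`" || PySem.List.pyGetD r 0 "" == "`Surface`") &&
      PySem.Set.contains imagebase_events (PySem.List.pyGetD r 1 "")))
  let rows3 := rows2.map (fun r =>
    if PySem.List.pyGetD r 0 "" == "`Image`" && PySem.Set.contains imagebase_events (PySem.List.pyGetD r 1 "") then
      ["`Image`, `Labels`"] ++ PySem.List.slice r (some 1) none
    else r)
  let rows4 := rows3.map (fun r =>
    if PySem.List.pyGetD r 0 "" == "`Image`" && PySem.Set.contains common_events (PySem.List.pyGetD r 1 "") then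
      ["`Image`, `Labels`, `Surface`"] ++ PySem.List.slice r (some 1) none
    else r)
  rows4

-- ===== PORT B =====
-- the literal dict BIT = {'`Image`': 1, '`Labels`': 2, '`Surface`': 4}
def pvBIT : PySem.Dict String Int :=
  PySem.Dict.ofList [("`Image`", 1), ("`Labels`", 2), ("`Surface`", 4)]

-- Python's int '|' / '&' on the (small, non-negative) bitmasks → Int.lor / Int.land (exact).
-- BIT[r[0]] is ported as getD … 0: it is only reached under 'r[0] in BIT', where it cannot raise.
def merge_image_and_label_rows_alt (rows : List (List String)) : List (List String) :=
  let seen := rows.foldl (fun (d : PySem.Dict String Int) r =>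
      if PySem.Dict.contains pvBIT (PySem.List.pyGetD r 0 "") then
        PySem.Dict.insert d (PySem.List.pyGetD r 1 "")
          (Int.lor (PySem.Dict.getD d (PySem.List.pyGetD r 1 "") 0)
                   (PySem.Dict.getD pvBIT (PySem.List.pyGetD r 0 "") 0))
      else d)
    PySem.Dict.empty
  rows.foldl (fun out r =>
      if !(PySem.Dict.contains pvBIT (PySem.List.pyGetD r 0 "")) then out ++ [r]
      else
        let m := PySem.Dict.getD seen (PySem.List.pyGetD r 1 "") 0
        if PySem.List.pyGetD r 0 "" == "`Image`" then
          if m == 7 then out ++ [["`Image`, `Labels`, `Surface`"] ++ PySem.List.slice r (some 1) none]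
          else if Int.land m 3 == 3 then out ++ [["`Image`, `Labels`"] ++ PySem.List.slice r (some 1) none]
          else out ++ [r]
        else if Int.land m 3 == 3 then out
        else out ++ [r])
    []

-- ===== PRECONDITION & SPEC =====
-- Pre_ excludes exactly the inputs on which A raises IndexError: a row that is empty
-- (r[0] fails) or a layer row (`Image`/`Labels`/`Surface`) of length 1 (r[1] fails).
def Pre_merge_image_and_label_rows (rows : List (List String)) : Prop :=
  ∀ r ∈ rows, r ≠ [] ∧
    ((r.getD 0 "" = "`Image`" ∨ r.getD 0 "" = "`Labels`" ∨ r.getD 0 "" = "`Surface`") → 2 ≤ r.length)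
instance (rows : List (List String)) : Decidable (Pre_merge_image_and_label_rows rows) := by unfold Pre_merge_image_and_label_rows; infer_instance
def pvWitness_merge_image_and_label_rows : List (List String) :=
  [["`Image`", "e1", "d"], ["`Labels`", "e1"], ["`Surface`", "e1"], ["`Points`", "e2"]]
def Spec_merge_image_and_label_rows (rows : List (List String)) (out : List (List String)) : Prop := out = merge_image_and_label_rows_alt rows
instance (rows : List (List String)) (out : List (List String)) : Decidable (Spec_merge_image_and_label_rows rows out) := by unfold Spec_merge_image_and_label_rows; infer_instance

-- ===== CLAIM (what is proved, stated in full; the proofs are below) =====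
def Claim_equal_merge_image_and_label_rows : Prop := ∀ (rows : List (List String)), Dom_merge_image_and_label_rows rows → Pre_merge_image_and_label_rows rows → Spec_merge_image_and_label_rows rows (merge_image_and_label_rows rows)

-- ===== LEMMAS AND PROOFS =====

-- the bitmask of a triple of membership booleans
def pvMask (a b c : Bool) : Int :=
  (if a then 1 else 0) + (if b then 2 else 0) + (if c then 4 else 0)

theorem pvBIT_eq : pvBIT = PySem.Dict.mk [("`Image`", 1), ("`Labels`", 2), ("`Surface`", 4)] := by decide

theorem pvMask_lor1 (a b c : Bool) : Int.lor (pvMask a b c) 1 = pvMask true b c := by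
  cases a <;> cases b <;> cases c <;> decide
theorem pvMask_lor2 (a b c : Bool) : Int.lor (pvMask a b c) 2 = pvMask a true c := by
  cases a <;> cases b <;> cases c <;> decide
theorem pvMask_lor4 (a b c : Bool) : Int.lor (pvMask a b c) 4 = pvMask a b true := by
  cases a <;> cases b <;> cases c <;> decide
theorem pvMask_eq7 (a b c : Bool) : (pvMask a b c == 7) = (a && b && c) := by
  cases a <;> cases b <;> cases c <;> decide
theorem pvMask_land3 (a b c : Bool) : (Int.land (pvMask a b c) 3 == 3) = (a && b) := by
  cases a <;> cases b <;> cases c <;> decide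

-- one update step of B's dict loop, per layer kind
theorem pv_step1 (d : PySem.Dict String Int) (i l s : String → Bool) (k : String)
    (h : ∀ x, d.getD x 0 = pvMask (i x) (l x) (s x)) :
    ∀ y, (PySem.Dict.insert d k (Int.lor (PySem.Dict.getD d k 0) 1)).getD y 0
      = pvMask (i y || decide (y = k)) (l y) (s y) := by
  intro y
  rw [PySem.Dict.getD_insert]
  by_cases hy : y = k
  · subst hy; rw [if_pos rfl, h, pvMask_lor1]; simp
  · simp [hy, h]

theorem pv_step2 (d : PySem.Dict String Int) (i l s : String → Bool) (k : String)
    (h : ∀ x, d.getD x 0 = pvMask (i x) (l x) (s x)) :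
    ∀ y, (PySem.Dict.insert d k (Int.lor (PySem.Dict.getD d k 0) 2)).getD y 0
      = pvMask (i y) (l y || decide (y = k)) (s y) := by
  intro y
  rw [PySem.Dict.getD_insert]
  by_cases hy : y = k
  · subst hy; rw [if_pos rfl, h, pvMask_lor2]; simp
  · simp [hy, h]

theorem pv_step4 (d : PySem.Dict String Int) (i l s : String → Bool) (k : String)
    (h : ∀ x, d.getD x 0 = pvMask (i x) (l x) (s x)) :
    ∀ y, (PySem.Dict.insert d k (Int.lor (PySem.Dict.getD d k 0) 4)).getD y 0
      = pvMask (i y) (l y) (s y || decide (y = k)) := by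
  intro y
  rw [PySem.Dict.getD_insert]
  by_cases hy : y = k
  · subst hy; rw [if_pos rfl, h, pvMask_lor4]; simp
  · simp [hy, h]

-- B's dict-building fold computes the membership bitmask of A's three event lists.
theorem pv_build (rows : List (List String)) (d : PySem.Dict String Int)
    (i l s : String → Bool)
    (h : ∀ x, d.getD x 0 = pvMask (i x) (l x) (s x)) :
    ∀ x, (rows.foldl (fun (d : PySem.Dict String Int) r =>
      if PySem.Dict.contains pvBIT (PySem.List.pyGetD r 0 "") then
        PySem.Dict.insert d (PySem.List.pyGetD r 1 "")
          (Int.lor (PySem.Dict.getD d (PySem.List.pyGetD r 1 "") 0)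
                   (PySem.Dict.getD pvBIT (PySem.List.pyGetD r 0 "") 0))
      else d) d).getD x 0
    = pvMask
        (i x || decide (x ∈ (rows.filter (fun r => PySem.List.pyGetD r 0 "" == "`Image`")).map (fun r => PySem.List.pyGetD r 1 "")))
        (l x || decide (x ∈ (rows.filter (fun r => PySem.List.pyGetD r 0 "" == "`Labels`")).map (fun r => PySem.List.pyGetD r 1 "")))
        (s x || decide (x ∈ (rows.filter (fun r => PySem.List.pyGetD r 0 "" == "`Surface`")).map (fun r => PySem.List.pyGetD r 1 ""))) := by
  induction rows generalizing d i l s with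
  | nil => intro x; simp [h x]
  | cons r rs ih =>
    intro x
    simp only [List.foldl_cons, List.filter_cons]
    by_cases hI : PySem.List.pyGetD r 0 "" = "`Image`"
    · have hrec := ih (PySem.Dict.insert d (PySem.List.pyGetD r 1 "")
          (Int.lor (PySem.Dict.getD d (PySem.List.pyGetD r 1 "") 0) 1))
          (fun y => i y || decide (y = PySem.List.pyGetD r 1 "")) l s (pv_step1 d i l s _ h) x
      rw [hI, (show PySem.Dict.contains pvBIT "`Image`" = true by decide),
        (show PySem.Dict.getD pvBIT "`Image`" 0 = 1 by decide)]
      simp only [(show (("`Image`":String) == "`Image`") = true by decide),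
        (show (("`Image`":String) == "`Labels`") = false by decide),
        (show (("`Image`":String) == "`Surface`") = false by decide),
        if_true, Bool.false_eq_true, if_false, List.map_cons]
      rw [hrec]
      have hmc : ∀ (L : List String), decide (x ∈ PySem.List.pyGetD r 1 "" :: L)
          = (decide (x = PySem.List.pyGetD r 1 "") || decide (x ∈ L)) := fun L => by
        simp [List.mem_cons]
      rw [hmc, Bool.or_assoc]
    · by_cases hL : PySem.List.pyGetD r 0 "" = "`Labels`"
      · have hrec := ih (PySem.Dict.insert d (PySem.List.pyGetD r 1 "")
            (Int.lor (PySem.Dict.getD d (PySem.List.pyGetD r 1 "") 0) 2))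
            i (fun y => l y || decide (y = PySem.List.pyGetD r 1 "")) s (pv_step2 d i l s _ h) x
        rw [hL, (show PySem.Dict.contains pvBIT "`Labels`" = true by decide),
          (show PySem.Dict.getD pvBIT "`Labels`" 0 = 2 by decide)]
        simp only [(show (("`Labels`":String) == "`Image`") = false by decide),
          (show (("`Labels`":String) == "`Labels`") = true by decide),
          (show (("`Labels`":String) == "`Surface`") = false by decide),
          if_true, Bool.false_eq_true, if_false, List.map_cons]
        rw [hrec]
        have hmc : ∀ (L : List String), decide (x ∈ PySem.List.pyGetD r 1 "" :: L)
            = (decide (x = PySem.List.pyGetD r 1 "") || decide (x ∈ L)) := fun L => by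
          simp [List.mem_cons]
        rw [hmc, Bool.or_assoc]
      · by_cases hS : PySem.List.pyGetD r 0 "" = "`Surface`"
        · have hrec := ih (PySem.Dict.insert d (PySem.List.pyGetD r 1 "")
              (Int.lor (PySem.Dict.getD d (PySem.List.pyGetD r 1 "") 0) 4))
              i l (fun y => s y || decide (y = PySem.List.pyGetD r 1 "")) (pv_step4 d i l s _ h) x
          rw [hS, (show PySem.Dict.contains pvBIT "`Surface`" = true by decide),
            (show PySem.Dict.getD pvBIT "`Surface`" 0 = 4 by decide)]
          simp only [(show (("`Surface`":String) == "`Image`") = false by decide),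
            (show (("`Surface`":String) == "`Labels`") = false by decide),
            (show (("`Surface`":String) == "`Surface`") = true by decide),
            if_true, Bool.false_eq_true, if_false, List.map_cons]
          rw [hrec]
          have hmc : ∀ (L : List String), decide (x ∈ PySem.List.pyGetD r 1 "" :: L)
              = (decide (x = PySem.List.pyGetD r 1 "") || decide (x ∈ L)) := fun L => by
            simp [List.mem_cons]
          rw [hmc, Bool.or_assoc]
        · have hI' : ¬("`Image`" = PySem.List.pyGetD r 0 "") := fun hh => hI hh.symm
          have hL' : ¬("`Labels`" = PySem.List.pyGetD r 0 "") := fun hh => hL hh.symm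
          have hS' : ¬("`Surface`" = PySem.List.pyGetD r 0 "") := fun hh => hS hh.symm
          have hcon : PySem.Dict.contains pvBIT (PySem.List.pyGetD r 0 "") = false := by
            rw [pvBIT_eq]
            simp [beq_iff_eq, hI', hL', hS']
          have hrec := ih d i l s h x
          rw [hcon]
          simp only [Bool.false_eq_true, if_false]
          rw [hrec]
          have c1 : (PySem.List.pyGetD r 0 "" == "`Image`") = false := beq_eq_false_iff_ne.mpr hI
          have c2 : (PySem.List.pyGetD r 0 "" == "`Labels`") = false := beq_eq_false_iff_ne.mpr hL
          have c3 : (PySem.List.pyGetD r 0 "" == "`Surface`") = false := beq_eq_false_iff_ne.mpr hS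
          simp only [c1, c2, c3, Bool.false_eq_true, if_false]

-- the per-row contribution of A's four passes
def pvRowOut (c ib : PySem.Set String) (r : List String) : List (List String) :=
  if PySem.List.pyGetD r 0 "" == "`Labels`" || PySem.List.pyGetD r 0 "" == "`Surface`" then
    if PySem.Set.contains c (PySem.List.pyGetD r 1 "") || PySem.Set.contains ib (PySem.List.pyGetD r 1 "") then []
    else [r]
  else if PySem.List.pyGetD r 0 "" == "`Image`" then
    if PySem.Set.contains c (PySem.List.pyGetD r 1 "") then
      [["`Image`, `Labels`, `Surface`"] ++ PySem.List.slice r (some 1) none]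
    else if PySem.Set.contains ib (PySem.List.pyGetD r 1 "") then
      [["`Image`, `Labels`"] ++ PySem.List.slice r (some 1) none]
    else [r]
  else [r]

-- the per-row contribution of B's output loop
def pvRowB (seen : PySem.Dict String Int) (r : List String) : List (List String) :=
  if !(PySem.Dict.contains pvBIT (PySem.List.pyGetD r 0 "")) then [r]
  else
    let m := PySem.Dict.getD seen (PySem.List.pyGetD r 1 "") 0
    if PySem.List.pyGetD r 0 "" == "`Image`" then
      if m == 7 then [["`Image`, `Labels`, `Surface`"] ++ PySem.List.slice r (some 1) none]
      else if Int.land m 3 == 3 then [["`Image`, `Labels`"] ++ PySem.List.slice r (some 1) none]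
      else [r]
    else if Int.land m 3 == 3 then []
    else [r]

-- A's four passes equal one flatMap over pvRowOut, given that ib and c are disjoint.
theorem pv_passes (c ib : PySem.Set String)
    (hd : ∀ x, x ∈ ib → x ∉ c)
    (rows : List (List String)) :
    ((((rows.filter (fun r =>
        !((PySem.List.pyGetD r 0 "" == "`Labels`" || PySem.List.pyGetD r 0 "" == "`Surface`") &&
          PySem.Set.contains c (PySem.List.pyGetD r 1 "")))).filter (fun r =>
        !((PySem.List.pyGetD r 0 "" == "`Labels`" || PySem.List.pyGetD r 0 "" == "`Surface`") &&
          PySem.Set.contains ib (PySem.List.pyGetD r 1 "")))).map (fun r =>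
        if PySem.List.pyGetD r 0 "" == "`Image`" && PySem.Set.contains ib (PySem.List.pyGetD r 1 "") then
          ["`Image`, `Labels`"] ++ PySem.List.slice r (some 1) none
        else r)).map (fun r =>
        if PySem.List.pyGetD r 0 "" == "`Image`" && PySem.Set.contains c (PySem.List.pyGetD r 1 "") then
          ["`Image`, `Labels`, `Surface`"] ++ PySem.List.slice r (some 1) none
        else r))
    = rows.flatMap (pvRowOut c ib) := by
  induction rows with
  | nil => simp
  | cons r rs ih =>
    by_cases hI : PySem.List.pyGetD r 0 "" = "`Image`"
    · by_cases hc : PySem.List.pyGetD r 1 "" ∈ c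
      · have hib : PySem.List.pyGetD r 1 "" ∉ ib := fun h => hd _ h hc
        simp [pvRowOut, hI, hc, hib] at ih ⊢
        exact ih
      · by_cases hib : PySem.List.pyGetD r 1 "" ∈ ib
        · simp [pvRowOut, hI, hc, hib] at ih ⊢
          exact ih
        · simp [pvRowOut, hI, hc, hib] at ih ⊢
          exact ih
    · by_cases hLS : (PySem.List.pyGetD r 0 "" = "`Labels`" ∨ PySem.List.pyGetD r 0 "" = "`Surface`")
      · by_cases hc : PySem.List.pyGetD r 1 "" ∈ c
        · rcases hLS with h | h <;>
            (simp [pvRowOut, h, hc] at ih ⊢; exact ih)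
        · by_cases hib : PySem.List.pyGetD r 1 "" ∈ ib
          · rcases hLS with h | h <;>
              (simp [pvRowOut, h, hc, hib] at ih ⊢; exact ih)
          · rcases hLS with h | h <;>
              (simp [pvRowOut, h, hc, hib] at ih ⊢; exact ih)
      · rw [not_or] at hLS
        simp [pvRowOut, hI, hLS.1, hLS.2] at ih ⊢
        exact ih

-- B's output loop is acc ++ a flatMap of its per-row contribution
theorem pv_alt_loop (seen : PySem.Dict String Int) (rows : List (List String)) (acc : List (List String)) :
    rows.foldl (fun out r =>
      if !(PySem.Dict.contains pvBIT (PySem.List.pyGetD r 0 "")) then out ++ [r]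
      else
        let m := PySem.Dict.getD seen (PySem.List.pyGetD r 1 "") 0
        if PySem.List.pyGetD r 0 "" == "`Image`" then
          if m == 7 then out ++ [["`Image`, `Labels`, `Surface`"] ++ PySem.List.slice r (some 1) none]
          else if Int.land m 3 == 3 then out ++ [["`Image`, `Labels`"] ++ PySem.List.slice r (some 1) none]
          else out ++ [r]
        else if Int.land m 3 == 3 then out
        else out ++ [r]) acc
    = acc ++ rows.flatMap (pvRowB seen) := by
  have hbody : (fun (out : List (List String)) r =>
      if !(PySem.Dict.contains pvBIT (PySem.List.pyGetD r 0 "")) then out ++ [r]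
      else
        let m := PySem.Dict.getD seen (PySem.List.pyGetD r 1 "") 0
        if PySem.List.pyGetD r 0 "" == "`Image`" then
          if m == 7 then out ++ [["`Image`, `Labels`, `Surface`"] ++ PySem.List.slice r (some 1) none]
          else if Int.land m 3 == 3 then out ++ [["`Image`, `Labels`"] ++ PySem.List.slice r (some 1) none]
          else out ++ [r]
        else if Int.land m 3 == 3 then out
        else out ++ [r])
      = (fun out r => out ++ pvRowB seen r) := by
    funext out r
    unfold pvRowB
    simp only [pvRowB]
    split_ifs <;> simp
  rw [hbody, PySem.List.foldl_append_eq_flatMap]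

-- per-row agreement of the two per-row functions, given the bitmask characterization
theorem pv_row_eq (iE lE sE : List String) (seen : PySem.Dict String Int)
    (h : ∀ x, seen.getD x 0 = pvMask (decide (x ∈ iE)) (decide (x ∈ lE)) (decide (x ∈ sE)))
    (r : List String) :
    pvRowOut
      (PySem.Set.inter (PySem.Set.inter (PySem.Set.ofList iE) (PySem.Set.ofList lE)) (PySem.Set.ofList sE))
      (PySem.Set.diff (PySem.Set.inter (PySem.Set.ofList iE) (PySem.Set.ofList lE))
        (PySem.Set.inter (PySem.Set.inter (PySem.Set.ofList iE) (PySem.Set.ofList lE)) (PySem.Set.ofList sE)))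
      r
    = pvRowB seen r := by
  have hC' : PySem.Set.contains
      (PySem.Set.inter (PySem.Set.inter (PySem.Set.ofList iE) (PySem.Set.ofList lE)) (PySem.Set.ofList sE))
      (PySem.List.pyGetD r 1 "") = true
      ↔ (PySem.List.pyGetD r 1 "" ∈ iE ∧ PySem.List.pyGetD r 1 "" ∈ lE ∧ PySem.List.pyGetD r 1 "" ∈ sE) := by
    rw [PySem.Set.contains_iff]
    simp [PySem.Set.mem_inter, PySem.Set.mem_ofList, and_assoc]
  have hIB' : PySem.Set.contains
      (PySem.Set.diff (PySem.Set.inter (PySem.Set.ofList iE) (PySem.Set.ofList lE))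
        (PySem.Set.inter (PySem.Set.inter (PySem.Set.ofList iE) (PySem.Set.ofList lE)) (PySem.Set.ofList sE)))
      (PySem.List.pyGetD r 1 "") = true
      ↔ ((PySem.List.pyGetD r 1 "" ∈ iE ∧ PySem.List.pyGetD r 1 "" ∈ lE)
          ∧ ¬(PySem.List.pyGetD r 1 "" ∈ iE ∧ PySem.List.pyGetD r 1 "" ∈ lE ∧ PySem.List.pyGetD r 1 "" ∈ sE)) := by
    rw [PySem.Set.contains_iff]
    simp [PySem.Set.mem_diff, PySem.Set.mem_inter, PySem.Set.mem_ofList, and_assoc]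
  have hm := h (PySem.List.pyGetD r 1 "")
  simp only [pvRowOut, pvRowB]
  by_cases hI : PySem.List.pyGetD r 0 "" = "`Image`"
  · rw [hI]
    by_cases h1 : PySem.List.pyGetD r 1 "" ∈ iE <;>
    by_cases h2 : PySem.List.pyGetD r 1 "" ∈ lE <;>
    by_cases h3 : PySem.List.pyGetD r 1 "" ∈ sE <;>
      simp [hm, pvMask_eq7, pvMask_land3, hC', hIB', h1, h2, h3, pvBIT_eq]
  · by_cases hL : PySem.List.pyGetD r 0 "" = "`Labels`"
    · rw [hL]
      by_cases h1 : PySem.List.pyGetD r 1 "" ∈ iE <;>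
      by_cases h2 : PySem.List.pyGetD r 1 "" ∈ lE <;>
      by_cases h3 : PySem.List.pyGetD r 1 "" ∈ sE <;>
        simp [hm, pvMask_eq7, pvMask_land3, hC', hIB', h1, h2, h3, pvBIT_eq]
    · by_cases hS : PySem.List.pyGetD r 0 "" = "`Surface`"
      · rw [hS]
        by_cases h1 : PySem.List.pyGetD r 1 "" ∈ iE <;>
        by_cases h2 : PySem.List.pyGetD r 1 "" ∈ lE <;>
        by_cases h3 : PySem.List.pyGetD r 1 "" ∈ sE <;>
          simp [hm, pvMask_eq7, pvMask_land3, hC', hIB', h1, h2, h3, pvBIT_eq]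
      · have c1 : (PySem.List.pyGetD r 0 "" == "`Image`") = false := beq_eq_false_iff_ne.mpr hI
        have c2 : (PySem.List.pyGetD r 0 "" == "`Labels`") = false := beq_eq_false_iff_ne.mpr hL
        have c3 : (PySem.List.pyGetD r 0 "" == "`Surface`") = false := beq_eq_false_iff_ne.mpr hS
        have hI' : ¬("`Image`" = PySem.List.pyGetD r 0 "") := fun hh => hI hh.symm
        have hL' : ¬("`Labels`" = PySem.List.pyGetD r 0 "") := fun hh => hL hh.symm
        have hS' : ¬("`Surface`" = PySem.List.pyGetD r 0 "") := fun hh => hS hh.symm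
        have hcon : PySem.Dict.contains pvBIT (PySem.List.pyGetD r 0 "") = false := by
          rw [pvBIT_eq]
          simp [beq_iff_eq, hI', hL', hS']
        simp [c1, c2, c3, hcon]

theorem pv_flatMap_congr {a b : Type} (l : List a) (f g : a → List b)
    (h : ∀ x ∈ l, f x = g x) : l.flatMap f = l.flatMap g := by
  induction l with
  | nil => rfl
  | cons x xs ih => simp_all

-- ===== VERDICT (by name: the statement is the Claim_ definition above) =====
theorem merge_image_and_label_rows_spec : Claim_equal_merge_image_and_label_rows := by
  intro rows _ _
  show merge_image_and_label_rows rows = merge_image_and_label_rows_alt rows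
  simp only [merge_image_and_label_rows, merge_image_and_label_rows_alt]
  have hmask := pv_build rows PySem.Dict.empty (fun _ => false) (fun _ => false) (fun _ => false)
    (by intro x; simp [PySem.Dict.getD_empty, pvMask])
  simp only [Bool.false_or] at hmask
  rw [pv_alt_loop, List.nil_append,
    pv_passes _ _ (fun x hx => ((PySem.Set.mem_diff _ _ _).1 hx).2)]
  exact pv_flatMap_congr _ _ _ (fun r _ => pv_row_eq _ _ _ _ hmask r)
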